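-- pv_equiv track=rewrite | github.com/4pito3pito2pi/corpus-associated-files | gen-appendix.py | compress_pages
-- ===== SOURCE A (Python) =====
-- def compress_pages(pages):
--     """Generate page reference links, compressing consecutive runs."""
--     if not pages:
--         return ''
--     parts = []
--     i = 0
--     while i < len(pages):
--         start = pages[i]
--         end = start
--         while i + 1 < len(pages) and pages[i + 1] == end + 1:
--             i += 1
--             end = pages[i]
--         if start == end:
--             parts.append(f'<a href="corpus/rawcorpus.html#p{start}">{start}</a>')
--         elif end - start <= 2:
--             for p in range(start, end + 1):
--                 parts.append(f'<a href="corpus/rawcorpus.html#p{p}">{p}</a>')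
--         else:
--             parts.append(
--                 f'<a href="corpus/rawcorpus.html#p{start}">{start}</a>'
--                 f'\u2013<a href="corpus/rawcorpus.html#p{end}">{end}</a>'
--             )
--         i += 1
--     return ' '.join(parts)
-- ===== SOURCE B (Python) =====
-- def compress_pages(pages):
--     """Generate page reference links, compressing consecutive runs."""
--     fmt = '<a href="corpus/rawcorpus.html#p{0}">{0}</a>'.format
--     # Arithmetic grouping key: p - i is constant exactly on maximal runs of
--     # consecutive integers.  Run boundaries are the indices where it changes.
--     keys = [p - i for i, p in enumerate(pages)]
--     bounds = [j for j in range(len(keys)) if j == 0 or keys[j] != keys[j - 1]]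
--     parts = []
--     for a, b in zip(bounds, bounds[1:] + [len(pages)]):
--         s, e = pages[a], pages[b - 1]
--         if e - s <= 2:
--             # short runs (length 1..3) are written link by link
--             parts.extend(fmt(p) for p in range(s, e + 1))
--         else:
--             parts.append(fmt(s) + '\u2013' + fmt(e))
--     return ' '.join(parts)
-- ===== Notes on version B (the rewrite author's own statement) =====
-- stated objective: alternative
-- what changed: B replaces A's nested index-scanning while-loops with arithmetic-key grouping: it computes keys p-i (constant exactly on consecutive runs), collects the boundary indices where the key changes, zips adjacent boundaries into segments, and formats each segment with two branches (the single-page case collapses into the short-run case).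
import Mathlib
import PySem

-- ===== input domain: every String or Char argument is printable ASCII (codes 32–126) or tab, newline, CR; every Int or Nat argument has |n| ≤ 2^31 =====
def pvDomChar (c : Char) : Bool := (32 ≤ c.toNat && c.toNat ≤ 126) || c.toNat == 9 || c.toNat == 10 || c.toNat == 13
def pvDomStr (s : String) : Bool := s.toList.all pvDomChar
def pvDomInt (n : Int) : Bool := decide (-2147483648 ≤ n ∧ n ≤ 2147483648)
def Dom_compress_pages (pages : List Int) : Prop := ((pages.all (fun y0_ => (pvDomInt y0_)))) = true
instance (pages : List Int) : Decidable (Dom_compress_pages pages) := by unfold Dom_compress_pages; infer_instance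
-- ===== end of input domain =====

-- B groups by the arithmetic key p - i (constant exactly on consecutive runs), turning run
-- detection into boundary-index collection + zipping, instead of A's nested index-scanning loops.

-- the page link f-string, shared by both ports
def fmtLink (p : Int) : String :=
  "<a href=\"corpus/rawcorpus.html#p" ++ PySem.Int.toStr p ++ "\">" ++ PySem.Int.toStr p ++ "</a>"

-- ===== PORT A =====
-- inner while: advance i while pages[i+1] == end+1 (index always in range, guarded);
-- fuel = pages.length only makes the loop total, it is never exhausted before the guard fails
def aInner (pages : List Int) : Nat → Nat → Int → Nat × Int
  | 0, i, e => (i, e)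
  | fuel+1, i, e =>
    if i + 1 < pages.length ∧ pages.getD (i+1) 0 = e + 1 then
      aInner pages fuel (i+1) (pages.getD (i+1) 0)
    else (i, e)

-- outer while over index i, accumulating parts (fuel = pages.length, same remark)
def aLoop (pages : List Int) : Nat → Nat → List String → List String
  | 0, _, parts => parts
  | fuel+1, i, parts =>
    if i < pages.length then
      let start := pages.getD i 0
      let r := aInner pages pages.length i start
      let parts' := parts ++
        (if start = r.2 then [fmtLink start]
         else if r.2 - start ≤ 2 then (PySem.List.pyRange start (r.2+1) 1).map fmtLink
         else [fmtLink start ++ "–" ++ fmtLink r.2])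
      aLoop pages fuel (r.1 + 1) parts'
    else parts

def compress_pages (pages : List Int) : String :=
  if pages = [] then "" else PySem.Str.join " " (aLoop pages pages.length 0 [])

-- ===== PORT B =====
-- keys = [p - i for i, p in enumerate(pages)]
def bKeys (pages : List Int) : List Int :=
  (PySem.List.enumerate pages 0).map (fun ip => ip.2 - ip.1)

-- bounds = [j for j in range(len(keys)) if j == 0 or keys[j] != keys[j-1]]
def bBounds (keys : List Int) : List Nat :=
  (List.range keys.length).filter (fun j => j == 0 || keys.getD j 0 != keys.getD (j-1) 0)

-- the loop body: format the segment [a, b) of pages (s = pages[a], e = pages[b-1])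
def bSeg (pages : List Int) (ab : Nat × Nat) : List String :=
  if pages.getD (ab.2 - 1) 0 - pages.getD ab.1 0 ≤ 2 then
    (PySem.List.pyRange (pages.getD ab.1 0) (pages.getD (ab.2 - 1) 0 + 1) 1).map fmtLink
  else [fmtLink (pages.getD ab.1 0) ++ "–" ++ fmtLink (pages.getD (ab.2 - 1) 0)]

def compress_pages_alt (pages : List Int) : String :=
  let bounds := bBounds (bKeys pages)
  PySem.Str.join " " ((bounds.zip (bounds.drop 1 ++ [pages.length])).flatMap (bSeg pages))

-- ===== PRECONDITION & SPEC =====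
def Spec_compress_pages (pages : List Int) (out : String) : Prop := out = compress_pages_alt pages
instance (pages : List Int) (out : String) : Decidable (Spec_compress_pages pages out) := by unfold Spec_compress_pages; infer_instance

-- ===== CLAIM (what is proved, stated in full; the proofs are below) =====
def Claim_equal_compress_pages : Prop := ∀ (pages : List Int), Dom_compress_pages pages → Spec_compress_pages pages (compress_pages pages)

-- ===== LEMMAS AND PROOFS =====

-- canonical run decomposition, the common reference point
def runsFrom (s e : Int) : List Int → List (Int × Int)
  | [] => [(s, e)]
  | p :: rest => if p = e + 1 then runsFrom s p rest else (s, e) :: runsFrom p p rest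

def canonRuns : List Int → List (Int × Int)
  | [] => []
  | p :: rest => runsFrom p p rest

-- A's three-branch formatting of one run
def fmtRun (r : Int × Int) : List String :=
  if r.1 = r.2 then [fmtLink r.1]
  else if r.2 - r.1 ≤ 2 then (PySem.List.pyRange r.1 (r.2+1) 1).map fmtLink
  else [fmtLink r.1 ++ "–" ++ fmtLink r.2]

theorem aInner_ge (pages : List Int) (fuel : Nat) : ∀ (i : Nat) (e : Int),
    i ≤ (aInner pages fuel i e).1 := by
  induction fuel with
  | zero => intro i e; exact le_refl i
  | succ fuel ih =>
    intro i e
    unfold aInner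
    split
    · exact le_trans (Nat.le_succ i) (ih (i+1) _)
    · exact le_refl i

-- aInner finds the end of the current run: runsFrom over the remaining suffix
theorem aInner_spec (pages : List Int) (fuel : Nat) : ∀ (i : Nat), i < pages.length →
    pages.length - (i+1) ≤ fuel → ∀ (s e : Int),
      runsFrom s e (pages.drop (i+1)) =
        (s, (aInner pages fuel i e).2) :: canonRuns (pages.drop ((aInner pages fuel i e).1 + 1))
      ∧ (aInner pages fuel i e).1 < pages.length := by
  induction fuel with
  | zero =>
    intro i hi hf s e
    have h1 : pages.length ≤ i + 1 := by omega
    have hdrop : pages.drop (i+1) = [] := List.drop_eq_nil_of_le h1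
    have hcond : ¬ (i + 1 < pages.length ∧ pages.getD (i+1) 0 = e + 1) := fun hc => by omega
    exact ⟨by simp [aInner, hdrop, runsFrom, canonRuns], hi⟩
  | succ fuel ih =>
    intro i hi hf s e
    unfold aInner
    by_cases h : i + 1 < pages.length ∧ pages.getD (i+1) 0 = e + 1
    · obtain ⟨h1, h2⟩ := h
      have hdrop : pages.drop (i+1) = pages.getD (i+1) 0 :: pages.drop (i+2) := by
        rw [List.getD_eq_getElem pages 0 h1]
        rw [List.drop_eq_getElem_cons h1]
      rw [hdrop]
      simp only [runsFrom, if_pos h2, if_pos (And.intro h1 h2)]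
      exact ih (i+1) h1 (by omega) s (pages.getD (i+1) 0)
    · simp only [if_neg h]
      rcases Nat.lt_or_ge (i+1) pages.length with h1 | h1
      · -- next element exists but breaks the run
        have h2 : pages.getD (i+1) 0 ≠ e + 1 := fun hc => h ⟨h1, hc⟩
        have hdrop : pages.drop (i+1) = pages.getD (i+1) 0 :: pages.drop (i+2) := by
          rw [List.getD_eq_getElem pages 0 h1]
          rw [List.drop_eq_getElem_cons h1]
        constructor
        · rw [hdrop]
          simp only [runsFrom, if_neg h2, canonRuns]
        · exact hi
      · have hdrop : pages.drop (i+1) = [] := List.drop_eq_nil_of_le h1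
        exact ⟨by simp [hdrop, runsFrom, canonRuns], hi⟩

-- A's outer loop appends the formatted canonical runs of the remaining suffix
theorem aLoop_spec (pages : List Int) (fuel : Nat) : ∀ (i : Nat) (parts : List String),
    pages.length - i ≤ fuel →
    aLoop pages fuel i parts = parts ++ (canonRuns (pages.drop i)).flatMap fmtRun := by
  induction fuel with
  | zero =>
    intro i parts hf
    have hdrop : pages.drop i = [] := List.drop_eq_nil_of_le (by omega)
    simp [aLoop, hdrop, canonRuns]
  | succ fuel ih =>
    intro i parts hf
    unfold aLoop
    by_cases h : i < pages.length
    · simp only [if_pos h]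
      have hdrop : pages.drop i = pages.getD i 0 :: pages.drop (i+1) := by
        rw [List.getD_eq_getElem pages 0 h]
        rw [List.drop_eq_getElem_cons h]
      set start := pages.getD i 0 with hstart
      obtain ⟨hruns, hlt⟩ :=
        aInner_spec pages pages.length i h (by omega) start start
      have hge := aInner_ge pages pages.length i start
      rw [ih ((aInner pages pages.length i start).1 + 1) _ (by omega), hdrop]
      rw [show canonRuns (start :: pages.drop (i+1)) = runsFrom start start (pages.drop (i+1)) from rfl]
      rw [hruns, List.flatMap_cons]
      simp [fmtRun, List.append_assoc]
    · simp only [if_neg h]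
      have hdrop : pages.drop i = [] := List.drop_eq_nil_of_le (by omega)
      simp [hdrop, canonRuns]

-- recursive characterization of the boundary-index comprehension (prev = pages[i-1])
def boundsAux : Int → Nat → List Int → List Nat
  | _, _, [] => []
  | prev, i, p :: rest => (if p ≠ prev + 1 then [i] else []) ++ boundsAux p (i+1) rest

theorem bKeys_getD (pages : List Int) (j : Nat) (hj : j < pages.length) :
    (bKeys pages).getD j 0 = pages.getD j 0 - j := by
  have hlen : (PySem.List.enumerate pages 0).length = pages.length := by
    simp [PySem.List.length_enumerate]
  rw [bKeys, List.getD_eq_getElem _ 0 (by simpa [hlen] using hj),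
      List.getD_eq_getElem pages 0 hj]
  simp [PySem.List.getElem_enumerate]

-- pages[i] = p when drop i pages = p :: rest
theorem getD_of_drop (pages rest : List Int) (i : Nat) (p : Int)
    (h : pages.drop i = p :: rest) : pages.getD i 0 = p := by
  have h0 : (pages.drop i)[0]? = some p := by rw [h]; rfl
  have h1 : pages[i]? = some p := by
    rw [show i = i + 0 from rfl, ← List.getElem?_drop]
    simpa using h0
  simp [List.getD_eq_getElem?_getD, h1]

theorem filter_eq_boundsAux (pages : List Int) : ∀ (rest : List Int) (i : Nat),
    1 ≤ i → pages.drop i = rest → i + rest.length = pages.length →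
    (List.range' i rest.length).filter
        (fun j => j == 0 || (bKeys pages).getD j 0 != (bKeys pages).getD (j-1) 0)
      = boundsAux (pages.getD (i-1) 0) i rest := by
  intro rest
  induction rest with
  | nil => intro i _ _ _; simp [boundsAux]
  | cons p rest ih =>
    intro i h1 hdrop hlen
    have hi : i < pages.length := by simp at hlen; omega
    have hi1 : i - 1 < pages.length := by omega
    have hp : pages.getD i 0 = p := getD_of_drop pages rest i p hdrop
    have hdrop' : pages.drop (i+1) = rest := by
      have h' : (pages.drop i).drop 1 = rest := by rw [hdrop]; simp
      simpa [List.drop_drop, Nat.add_comm] using h'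
    have hrec := ih (i+1) (by omega) hdrop' (by simp at hlen ⊢; omega)
    have hprev1 : pages.getD ((i+1)-1) 0 = p := by simpa using hp
    rw [hprev1] at hrec
    have hbool : ((i == 0 || (bKeys pages).getD i 0 != (bKeys pages).getD (i-1) 0))
        = decide (p ≠ pages.getD (i-1) 0 + 1) := by
      rw [bKeys_getD pages i hi, bKeys_getD pages (i-1) hi1, hp]
      have h0 : (i == 0) = false := by
        rw [beq_eq_false_iff_ne]; omega
      have hcast : ((i - 1 : Nat) : Int) = (i : Int) - 1 := by omega
      rw [h0, Bool.false_or, hcast]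
      by_cases hc : p = pages.getD (i-1) 0 + 1
      · subst hc
        have he : pages.getD (i-1) 0 + 1 - (i : Int) = pages.getD (i-1) 0 - ((i : Int) - 1) := by
          ring
        rw [he]
        simp
      · have hr : decide (¬ p = pages.getD (i-1) 0 + 1) = true := by simpa using hc
        rw [hr, bne_iff_ne]
        omega
    simp only [List.length_cons]
    rw [List.range'_succ, List.filter_cons, hbool, hrec]
    by_cases hc : p = pages.getD (i-1) 0 + 1
    · rw [show (decide (¬ p = pages.getD (i-1) 0 + 1)) = false by simpa using hc]
      simp only [Bool.false_eq_true, if_false, boundsAux, if_neg (not_not_intro hc),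
        List.nil_append]
    · rw [show (decide (¬ p = pages.getD (i-1) 0 + 1)) = true by simpa using hc]
      simp only [if_true, boundsAux, if_pos hc, List.singleton_append]

-- zipping adjacent boundaries recovers the canonical runs of the suffix
theorem zip_boundsAux (pages : List Int) : ∀ (rest : List Int) (i sIdx : Nat),
    1 ≤ i → pages.drop i = rest → i + rest.length = pages.length → sIdx < i →
    ((sIdx :: boundsAux (pages.getD (i-1) 0) i rest).zip
        (boundsAux (pages.getD (i-1) 0) i rest ++ [pages.length])).map
      (fun ab => (pages.getD ab.1 0, pages.getD (ab.2 - 1) 0))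
      = runsFrom (pages.getD sIdx 0) (pages.getD (i-1) 0) rest := by
  intro rest
  induction rest with
  | nil =>
    intro i sIdx h1 hdrop hlen hs
    have hin : i = pages.length := by simp at hlen; omega
    simp [boundsAux, runsFrom, ← hin]
  | cons p rest ih =>
    intro i sIdx h1 hdrop hlen hs
    have hp : pages.getD i 0 = p := getD_of_drop pages rest i p hdrop
    have hdrop' : pages.drop (i+1) = rest := by
      have h' : (pages.drop i).drop 1 = rest := by rw [hdrop]; simp
      simpa [List.drop_drop, Nat.add_comm] using h'
    have hlen' : (i+1) + rest.length = pages.length := by simp at hlen ⊢; omega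
    have hprev1 : pages.getD ((i+1)-1) 0 = p := by simpa using hp
    by_cases hc : p = pages.getD (i-1) 0 + 1
    · have hrec := ih (i+1) sIdx (by omega) hdrop' hlen' (by omega)
      rw [hprev1] at hrec
      simp only [boundsAux, if_neg (not_not_intro hc), List.nil_append]
      simp only [runsFrom, if_pos hc]
      exact hrec
    · have hrec := ih (i+1) i (by omega) hdrop' hlen' (by omega)
      rw [hprev1, hp] at hrec
      simp only [boundsAux, if_pos hc, List.cons_append]
      simp only [runsFrom, if_neg hc]
      simpa using hrec

-- the two-branch segment formatter agrees with A's three-branch run formatter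
theorem bSeg_eq_fmtRun (pages : List Int) (ab : Nat × Nat) :
    bSeg pages ab = fmtRun (pages.getD ab.1 0, pages.getD (ab.2 - 1) 0) := by
  unfold bSeg fmtRun
  generalize pages.getD ab.1 0 = s
  generalize pages.getD (ab.2 - 1) 0 = e
  by_cases h : s = e
  · subst h
    simp [PySem.List.pyRange_one_singleton]
  · simp [h]

theorem flatMap_bSeg (pages : List Int) (l : List (Nat × Nat)) :
    l.flatMap (bSeg pages) =
      (l.map (fun ab => (pages.getD ab.1 0, pages.getD (ab.2 - 1) 0))).flatMap fmtRun := by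
  induction l with
  | nil => rfl
  | cons a l ihl => simp [List.flatMap_cons, ihl, bSeg_eq_fmtRun]

-- ===== VERDICT (by name: the statement is the Claim_ definition above) =====
theorem compress_pages_spec : Claim_equal_compress_pages := by
  intro pages _
  unfold Spec_compress_pages compress_pages compress_pages_alt
  cases hpg : pages with
  | nil => simp [bBounds, bKeys, PySem.Str.join]
  | cons p rest =>
    rw [if_neg (by simp)]
    have hA : aLoop (p :: rest) (p :: rest).length 0 [] =
        (canonRuns (p :: rest)).flatMap fmtRun := by
      have h' := aLoop_spec (p :: rest) (p :: rest).length 0 [] (by omega)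
      simpa using h'
    rw [hA]
    have hkeylen : (bKeys (p :: rest)).length = (p :: rest).length := by
      simp [bKeys, PySem.List.length_enumerate]
    have hbounds : bBounds (bKeys (p :: rest)) =
        0 :: boundsAux ((p :: rest).getD ((1:Nat)-1) 0) 1 rest := by
      rw [bBounds, hkeylen]
      have hr : List.range (p :: rest).length = 0 :: List.range' 1 rest.length := by
        rw [List.range_eq_range']
        simp [List.range'_succ]
      rw [hr, List.filter_cons,
        filter_eq_boundsAux (p :: rest) rest 1 (by omega) (by simp) (by simp [Nat.add_comm])]
      simp
    rw [hbounds]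
    simp only [List.drop_one, List.tail_cons]
    rw [flatMap_bSeg (p :: rest),
      zip_boundsAux (p :: rest) rest 1 0 (by omega) (by simp) (by simp [Nat.add_comm]) (by omega)]
    simp [canonRuns]
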